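-- pv_equiv track=rewrite | github.com/llnneennaa/pharmalogic-api | backend/rules_engine.py | calculate_risk_percentage
-- ===== SOURCE A (Python) =====
-- from typing import List, Dict, Any, Optional
--
-- def calculate_risk_percentage(interactions: List[Dict]) -> int:
--     """
--     Calculate numerical risk percentage based on interactions
--     """
--     if not interactions:
--         return 0
--
--     total_score = 0
--     for interaction in interactions:
--         severity = interaction["severity"].lower()
--         if severity == "high":
--             total_score += 85
--         elif severity == "moderate":
--             total_score += 55
--         elif severity == "low":
--             total_score += 25
--
--     avg_score = total_score / len(interactions)
--     return int(avg_score)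
-- ===== SOURCE B (Python) =====
-- SEVERITY_WEIGHTS = (("high", 85), ("moderate", 55), ("low", 25))
--
-- def calculate_risk_percentage(interactions):
--     """
--     Calculate numerical risk percentage based on interactions
--     """
--     n = len(interactions)
--     if n == 0:
--         return 0
--
--     # Extract the normalised severities once, then iterate over the WEIGHT TABLE,
--     # counting each category with its own scan; unknown severities contribute 0.
--     sevs = [interaction["severity"].lower() for interaction in interactions]
--     total = 0
--     for sev, weight in SEVERITY_WEIGHTS:
--         total += weight * sevs.count(sev)
--     # total >= 0, so int(total / n) equals floor division.
--     return total // n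
-- ===== Notes on version B (the rewrite author's own statement) =====
-- stated objective: alternative
-- what changed: Instead of one pass over the interactions with an if/elif chain accumulating a score, B extracts the normalised severities and then loops over a weight table, counting each category with its own list.count scan, and replaces int(total/n) float division by integer floor division (valid since total >= 0).
import Mathlib
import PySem

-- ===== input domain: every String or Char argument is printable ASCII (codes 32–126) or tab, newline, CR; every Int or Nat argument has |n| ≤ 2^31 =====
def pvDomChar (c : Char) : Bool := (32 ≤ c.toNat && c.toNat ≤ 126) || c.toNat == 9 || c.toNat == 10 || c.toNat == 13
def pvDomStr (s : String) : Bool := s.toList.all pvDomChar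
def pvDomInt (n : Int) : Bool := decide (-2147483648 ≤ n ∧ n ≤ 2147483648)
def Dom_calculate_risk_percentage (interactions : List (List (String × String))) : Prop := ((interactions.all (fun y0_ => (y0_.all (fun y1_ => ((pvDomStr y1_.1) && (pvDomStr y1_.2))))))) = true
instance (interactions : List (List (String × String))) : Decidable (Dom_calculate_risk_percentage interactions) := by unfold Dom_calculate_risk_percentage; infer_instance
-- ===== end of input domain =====

-- B loops over a weight table counting each severity category with its own scan instead of
-- A's single per-element if/elif accumulation pass (alternative decomposition; same cost).

-- shared helper: interaction["severity"].lower() — both Pythons contain this exact expression.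
-- The .getD "" default is never reached inside Pre_ (a missing key is a KeyError, excluded).
def pvSev (i : List (String × String)) : String :=
  PySem.Str.lower (((PySem.Dict.mk i).get? "severity").getD "")

-- ===== PORT A =====
-- int(total/len) with total ≥ 0 (a sum of 85/55/25/0) and len > 0: truncation = floor, and the
-- double quotient (≤ 85) is too accurate to cross an integer here, so PySem.Int.floordiv is exact.
def calculate_risk_percentage (interactions : List (List (String × String))) : Int :=
  if interactions = [] then 0
  else
    let total_score := interactions.foldl (fun acc interaction =>
      let severity := pvSev interaction
      if severity = "high" then acc + 85
      else if severity = "moderate" then acc + 55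
      else if severity = "low" then acc + 25
      else acc) 0
    PySem.Int.floordiv total_score interactions.length

-- ===== PORT B =====
def pvSeverityWeights : List (String × Int) := [("high", 85), ("moderate", 55), ("low", 25)]

def calculate_risk_percentage_alt (interactions : List (List (String × String))) : Int :=
  let n : Int := interactions.length
  if n = 0 then 0
  else
    let sevs := interactions.map pvSev
    let total := pvSeverityWeights.foldl
      (fun total p => total + p.2 * ((PySem.List.count sevs p.1 : Int))) 0
    PySem.Int.floordiv total n

-- ===== PRECONDITION & SPEC =====
-- Pre_ excludes exactly the inputs where A (and B) raise KeyError: an interaction dict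
-- without a "severity" key.
def Pre_calculate_risk_percentage (interactions : List (List (String × String))) : Prop :=
  ∀ i ∈ interactions, ∃ p ∈ i, p.1 = "severity"
instance (interactions : List (List (String × String))) : Decidable (Pre_calculate_risk_percentage interactions) := by unfold Pre_calculate_risk_percentage; infer_instance
def pvWitness_calculate_risk_percentage : (List (List (String × String))) :=
  [[("severity", "High")], [("severity", "low")]]

def Spec_calculate_risk_percentage (interactions : List (List (String × String))) (out : Int) : Prop := out = calculate_risk_percentage_alt interactions
instance (interactions : List (List (String × String))) (out : Int) : Decidable (Spec_calculate_risk_percentage interactions out) := by unfold Spec_calculate_risk_percentage; infer_instance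

-- ===== CLAIM (what is proved, stated in full; the proofs are below) =====
def Claim_equal_calculate_risk_percentage : Prop := ∀ (interactions : List (List (String × String))), Dom_calculate_risk_percentage interactions → Pre_calculate_risk_percentage interactions → Spec_calculate_risk_percentage interactions (calculate_risk_percentage interactions)

-- ===== LEMMAS AND PROOFS =====

-- A's accumulation equals the weighted severity counts.
lemma totalA_counts (l : List (List (String × String))) : ∀ acc : Int,
    l.foldl (fun acc interaction =>
      let severity := pvSev interaction
      if severity = "high" then acc + 85
      else if severity = "moderate" then acc + 55
      else if severity = "low" then acc + 25
      else acc) acc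
    = acc + 85 * ((l.map pvSev).count "high" : Int)
          + 55 * ((l.map pvSev).count "moderate" : Int)
          + 25 * ((l.map pvSev).count "low" : Int) := by
  induction l with
  | nil => simp
  | cons x xs ih =>
    intro acc
    simp only [List.foldl_cons, List.map_cons, List.count_cons, ih]
    by_cases h1 : pvSev x = "high" <;> by_cases h2 : pvSev x = "moderate" <;>
      by_cases h3 : pvSev x = "low" <;>
      simp [h1, h2, h3, beq_iff_eq] <;> ring

-- ===== VERDICT (by name: the statement is the Claim_ definition above) =====
theorem calculate_risk_percentage_spec : Claim_equal_calculate_risk_percentage := by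
  intro interactions _ _
  unfold Spec_calculate_risk_percentage calculate_risk_percentage calculate_risk_percentage_alt
  by_cases h : interactions = []
  · simp [h]
  · have hn : (interactions.length : Int) ≠ 0 := by
      have := List.length_pos_iff.mpr h; omega
    simp only [h, if_false, hn, totalA_counts, pvSeverityWeights,
      List.foldl_cons, List.foldl_nil, PySem.List.count_eq]
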